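-- pv_equiv track=rewrite | github.com/Zyphoriate/SDU-CyberScience-Undergrad-Lectures | 2026/Spring/OperatingSystem/LabWorks/OS_lab2/gen.py | select_nearby_lines
-- ===== SOURCE A (Python) =====
-- from typing import Dict, List, Tuple
--
-- def select_nearby_lines(lines: List[str], context_lines: int) -> List[str]:
--     modified_idx = [i for i, line in enumerate(lines) if line and line[0] in "+-"]
--     if not modified_idx:
--         return []
--
--     ranges: List[Tuple[int, int]] = []
--     for idx in modified_idx:
--         start = max(0, idx - context_lines)
--         end = min(len(lines) - 1, idx + context_lines)
--         ranges.append((start, end))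
--
--     merged: List[Tuple[int, int]] = []
--     for start, end in sorted(ranges):
--         if not merged or start > merged[-1][1] + 1:
--             merged.append((start, end))
--         else:
--             prev_start, prev_end = merged[-1]
--             merged[-1] = (prev_start, max(prev_end, end))
--
--     out: List[str] = []
--     for start, end in merged:
--         out.extend(lines[start : end + 1])
--     return out
-- ===== SOURCE B (Python) =====
-- from typing import List
--
--
-- def select_nearby_lines(lines: List[str], context_lines: int) -> List[str]:
--     mods = [i for i, line in enumerate(lines) if line and line[0] in "+-"]
--     return [line for i, line in enumerate(lines)
--             if any(abs(i - j) <= context_lines for j in mods)]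
-- ===== Notes on version B (the rewrite author's own statement) =====
-- stated objective: simpler
-- what changed: B drops A's range list, sort and interval-merge loop entirely: it keeps a line iff some modified index lies within context_lines of it, in one ordered filtering pass over the lines.
-- outside the precondition, e.g. on select_nearby_lines(['+a', 'b', 'c', 'd', 'e'], -2): A returns ['c', 'd'], B returns []
import Mathlib
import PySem

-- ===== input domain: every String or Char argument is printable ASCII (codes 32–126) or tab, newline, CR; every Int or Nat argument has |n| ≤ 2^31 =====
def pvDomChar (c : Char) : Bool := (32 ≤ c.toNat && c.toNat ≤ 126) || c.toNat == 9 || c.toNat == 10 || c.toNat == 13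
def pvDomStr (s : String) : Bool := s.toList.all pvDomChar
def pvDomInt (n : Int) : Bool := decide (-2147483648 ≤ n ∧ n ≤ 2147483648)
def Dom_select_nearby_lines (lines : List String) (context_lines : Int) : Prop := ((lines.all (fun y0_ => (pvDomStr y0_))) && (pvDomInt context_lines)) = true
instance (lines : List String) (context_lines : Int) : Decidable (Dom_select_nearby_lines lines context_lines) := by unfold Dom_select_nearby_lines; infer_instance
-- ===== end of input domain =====

-- B replaces A's range list, sort and interval-merge loop by a single filtering pass
-- keeping each line whose index is within context_lines of some modified index (objective: simpler).


-- ===== PORT A =====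
-- A-side helper: Python's "line and line[0] in '+-'" (membership of a single
-- character in the two-char literal "+-" is equality with '+' or '-'); exact on all strings.
def pvIsMod (line : String) : Bool :=
  match line.toList with
  | [] => false
  | c :: _ => c == '+' || c == '-'

def select_nearby_lines (lines : List String) (context_lines : Int) : List String :=
  let modified_idx : List Int :=
    ((PySem.List.enumerate lines 0).filter (fun p => pvIsMod p.2)).map (·.1)
  if modified_idx = [] then []
  else
    let ranges : List (Int × Int) :=
      modified_idx.foldl (fun acc idx =>
        acc ++ [(max 0 (idx - context_lines), min ((lines.length : Int) - 1) (idx + context_lines))]) []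
    let merged : List (Int × Int) :=
      (PySem.List.sorted2 ranges (fun r => r.1) (fun r => r.2)).foldl (fun merged r =>
        match merged.getLast? with
        | none => merged ++ [r]
        | some prev =>
          if r.1 > prev.2 + 1 then merged ++ [r]
          else merged.dropLast ++ [(prev.1, max prev.2 r.2)]) []
    merged.foldl (fun acc r => acc ++ PySem.List.slice lines (some r.1) (some (r.2 + 1))) []

-- ===== PORT B =====
def select_nearby_lines_alt (lines : List String) (context_lines : Int) : List String :=
  let mods : List Int :=
    ((PySem.List.enumerate lines 0).filter (fun p => pvIsMod p.2)).map (·.1)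
  ((PySem.List.enumerate lines 0).filter (fun p =>
    mods.any (fun j => decide (|p.1 - j| ≤ context_lines)))).map (·.2)

-- ===== PRECONDITION & SPEC =====
-- Pre_ restricts to the function's natural domain: a negative context-line count is
-- excluded (there A's slice with a negative stop wraps around and returns accidental segments).
def Pre_select_nearby_lines (lines : List String) (context_lines : Int) : Prop :=
  0 ≤ context_lines
instance (lines : List String) (context_lines : Int) : Decidable (Pre_select_nearby_lines lines context_lines) := by unfold Pre_select_nearby_lines; infer_instance

def pvWitness_select_nearby_lines : List String × Int := (["+x", "y", "z"], 1)

def Spec_select_nearby_lines (lines : List String) (context_lines : Int) (out : List String) : Prop := out = select_nearby_lines_alt lines context_lines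
instance (lines : List String) (context_lines : Int) (out : List String) : Decidable (Spec_select_nearby_lines lines context_lines out) := by unfold Spec_select_nearby_lines; infer_instance

-- ===== CLAIM (what is proved, stated in full; the proofs are below) =====
def Claim_equal_select_nearby_lines : Prop := ∀ (lines : List String) (context_lines : Int), Dom_select_nearby_lines lines context_lines → Pre_select_nearby_lines lines context_lines → Spec_select_nearby_lines lines context_lines (select_nearby_lines lines context_lines)

-- ===== LEMMAS AND PROOFS =====

-- Normal form both programs are reduced to: the lines whose index satisfies q,
-- in order (indices counted from s).
def pvFgen (lines : List String) (s : Int) (q : Int → Bool) : List String :=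
  ((PySem.List.enumerate lines s).filter (fun p => q p.1)).map (·.2)

-- membership of x in one of the closed intervals of M
def pvCover (M : List (Int × Int)) (x : Int) : Bool :=
  M.any (fun r => decide (r.1 ≤ x) && decide (x ≤ r.2))

theorem pvFgen_nil (s : Int) (q : Int → Bool) : pvFgen [] s q = [] := rfl

theorem pvFgen_cons (x : String) (xs : List String) (s : Int) (q : Int → Bool) :
    pvFgen (x :: xs) s q = (if q s then [x] else []) ++ pvFgen xs (s + 1) q := by
  simp only [pvFgen, PySem.List.enumerate_cons, List.filter_cons]
  split <;> simp

theorem pvFgen_congr (xs : List String) (s : Int) (q q' : Int → Bool)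
    (h : ∀ x, s ≤ x → x < s + xs.length → q x = q' x) : pvFgen xs s q = pvFgen xs s q' := by
  induction xs generalizing s with
  | nil => rfl
  | cons a t ih =>
    rw [pvFgen_cons, pvFgen_cons,
      h s le_rfl (by simp only [List.length_cons]; push_cast; omega),
      ih (s + 1) (fun x h1 h2 => h x (by omega)
        (by simp only [List.length_cons] at h2 ⊢; push_cast at h2 ⊢; omega))]

theorem pvFgen_false (xs : List String) (s : Int) (q : Int → Bool)
    (h : ∀ x, s ≤ x → x < s + xs.length → q x = false) : pvFgen xs s q = [] := by
  induction xs generalizing s with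
  | nil => rfl
  | cons a t ih =>
    rw [pvFgen_cons, h s le_rfl (by simp only [List.length_cons]; push_cast; omega),
      ih (s + 1) (fun x h1 h2 => h x (by omega)
        (by simp only [List.length_cons] at h2 ⊢; push_cast at h2 ⊢; omega))]
    simp

theorem pvFgen_split (xs : List String) (s : Int) (q1 q2 : Int → Bool) (t : Int)
    (h1 : ∀ x, q1 x = true → x < t) (h2 : ∀ x, q2 x = true → t ≤ x) :
    pvFgen xs s (fun x => q1 x || q2 x) = pvFgen xs s q1 ++ pvFgen xs s q2 := by
  induction xs generalizing s with
  | nil => rfl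
  | cons a xs ih =>
    rw [pvFgen_cons, pvFgen_cons, pvFgen_cons, ih (s + 1)]
    by_cases hq2 : q2 s = true
    · have hts : t ≤ s := h2 s hq2
      have hq1 : q1 s = false := by
        cases hq : q1 s
        · rfl
        · exact absurd (h1 s hq) (by omega)
      have hnil : pvFgen xs (s + 1) q1 = [] := by
        apply pvFgen_false
        intro x hx _
        cases hq : q1 x
        · rfl
        · exact absurd (h1 x hq) (by omega)
      simp [hq1, hq2, hnil]
    · simp only [Bool.not_eq_true] at hq2
      simp only [hq2, Bool.or_false]
      split <;> simp

theorem pvFgen_shift (xs : List String) (s : Int) (q : Int → Bool) :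
    pvFgen xs (s + 1) q = pvFgen xs s (fun x => q (x + 1)) := by
  induction xs generalizing s with
  | nil => rfl
  | cons y ys ih => rw [pvFgen_cons, pvFgen_cons, ih]

theorem pvFgen_interval (xs : List String) (a b : Int) :
    pvFgen xs 0 (fun x => decide (a ≤ x) && decide (x ≤ b)) =
      (xs.drop a.toNat).take (b + 1 - max a 0).toNat := by
  induction xs generalizing a b with
  | nil => simp [pvFgen_nil]
  | cons y ys ih =>
    rw [pvFgen_cons, pvFgen_shift]
    have hp : (fun x => decide (a ≤ x + 1) && decide (x + 1 ≤ b))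
        = fun x => decide (a - 1 ≤ x) && decide (x ≤ b - 1) := by
      funext x
      rw [Bool.eq_iff_iff]
      simp only [Bool.and_eq_true, decide_eq_true_eq]
      omega
    rw [hp, ih (a - 1) (b - 1)]
    by_cases ha : a ≤ 0
    · by_cases hbb : 0 ≤ b
      · have h1 : (decide (a ≤ (0:Int)) && decide ((0:Int) ≤ b)) = true := by
          simp only [Bool.and_eq_true, decide_eq_true_eq]; omega
        rw [h1]
        have h2 : (a - 1).toNat = 0 := by omega
        have h3 : a.toNat = 0 := by omega
        rw [h2, h3, List.drop_zero, List.drop_zero]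
        have h4 : (b + 1 - max a 0).toNat = (b - 1 + 1 - max (a - 1) 0).toNat + 1 := by omega
        rw [h4, List.take_succ_cons]
        simp
      · have h1 : (decide (a ≤ (0:Int)) && decide ((0:Int) ≤ b)) = false := by
          simp only [Bool.and_eq_false_iff, decide_eq_false_iff_not]; omega
        rw [h1]
        have h2 : (b - 1 + 1 - max (a - 1) 0).toNat = 0 := by omega
        have h3 : (b + 1 - max a 0).toNat = 0 := by omega
        rw [h2, h3]
        simp
    · have h1 : (decide (a ≤ (0:Int)) && decide ((0:Int) ≤ b)) = false := by
        simp only [Bool.and_eq_false_iff, decide_eq_false_iff_not]; omega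
      rw [h1]
      have h2 : a.toNat = (a - 1).toNat + 1 := by omega
      rw [h2, List.drop_succ_cons]
      have h3 : (b + 1 - max a 0).toNat = (b - 1 + 1 - max (a - 1) 0).toNat := by omega
      rw [h3]
      simp

theorem pvChain_head_lt (r : Int × Int) (M : List (Int × Int))
    (hb : ∀ m ∈ M, m.1 ≤ m.2)
    (hc : List.IsChain (fun p q : Int × Int => p.2 + 1 < q.1) (r :: M)) :
    ∀ m ∈ M, r.2 + 1 < m.1 := by
  induction M generalizing r with
  | nil => intro m hm; cases hm
  | cons m M ih =>
    rw [List.isChain_cons_cons] at hc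
    intro m' hm'
    rcases List.mem_cons.mp hm' with hm' | hm'
    · subst hm'; exact hc.1
    · have := ih m (fun x hx => hb x (by simp [hx])) hc.2 m' hm'
      have hmm := hb m (by simp)
      have := hc.1
      omega

theorem pvFlatten (lines : List String) (M : List (Int × Int))
    (hb : ∀ r ∈ M, 0 ≤ r.1 ∧ r.1 ≤ r.2)
    (hc : List.IsChain (fun p q : Int × Int => p.2 + 1 < q.1) M) :
    M.flatMap (fun r => PySem.List.slice lines (some r.1) (some (r.2 + 1))) =
      pvFgen lines 0 (fun x => pvCover M x) := by
  induction M with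
  | nil =>
    rw [List.flatMap_nil, pvFgen_false]
    intro x _ _; simp [pvCover]
  | cons r M ih =>
    have hr := hb r (by simp)
    have hsplit := pvFgen_split lines 0
      (fun x => decide (r.1 ≤ x) && decide (x ≤ r.2)) (fun x => pvCover M x) (r.2 + 1)
      (by intro x hx; simp at hx; omega)
      (by
        intro x hx
        simp only [pvCover, List.any_eq_true, Bool.and_eq_true, decide_eq_true_eq] at hx
        obtain ⟨m, hm, h1, _⟩ := hx
        have := pvChain_head_lt r M (fun m hm => (hb m (by simp [hm])).2) hc m hm
        omega)
    have hcov : (fun x => pvCover (r :: M) x)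
        = fun x => (decide (r.1 ≤ x) && decide (x ≤ r.2)) || pvCover M x := by
      funext x; simp [pvCover]
    rw [List.flatMap_cons, hcov, hsplit,
      ih (fun m hm => hb m (by simp [hm])) (hc.tail)]
    congr 1
    rw [PySem.List.slice_toNat lines (by omega) (by omega), pvFgen_interval]
    congr 1
    omega

-- merge-loop invariant: the accumulator stays a chain of well-formed intervals whose
-- starts precede all remaining starts, and it covers exactly the intervals already processed
theorem pvMerge_invariant (R : List (Int × Int)) :
    ∀ (M : List (Int × Int)),
    (∀ r ∈ R, 0 ≤ r.1 ∧ r.1 ≤ r.2) →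
    R.Pairwise (fun a b => a.1 ≤ b.1) →
    (∀ m ∈ M, 0 ≤ m.1 ∧ m.1 ≤ m.2) →
    List.IsChain (fun p q : Int × Int => p.2 + 1 < q.1) M →
    (∀ m ∈ M, ∀ r ∈ R, m.1 ≤ r.1) →
    (∀ m ∈ R.foldl (fun merged r =>
        match merged.getLast? with
        | none => merged ++ [r]
        | some prev =>
          if r.1 > prev.2 + 1 then merged ++ [r]
          else merged.dropLast ++ [(prev.1, max prev.2 r.2)]) M,
      0 ≤ m.1 ∧ m.1 ≤ m.2) ∧
    List.IsChain (fun p q : Int × Int => p.2 + 1 < q.1)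
      (R.foldl (fun merged r =>
        match merged.getLast? with
        | none => merged ++ [r]
        | some prev =>
          if r.1 > prev.2 + 1 then merged ++ [r]
          else merged.dropLast ++ [(prev.1, max prev.2 r.2)]) M) ∧
    (∀ x, pvCover (R.foldl (fun merged r =>
        match merged.getLast? with
        | none => merged ++ [r]
        | some prev =>
          if r.1 > prev.2 + 1 then merged ++ [r]
          else merged.dropLast ++ [(prev.1, max prev.2 r.2)]) M) x
      = (pvCover M x || pvCover R x)) := by
  induction R with
  | nil =>
    intro M hR hPW hMb hMc hOrd
    refine ⟨hMb, hMc, fun x => ?_⟩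
    simp [pvCover]
  | cons r R ih =>
    intro M hR hPW hMb hMc hOrd
    have hr := hR r (by simp)
    have hR' : ∀ r' ∈ R, 0 ≤ r'.1 ∧ r'.1 ≤ r'.2 := fun r' h => hR r' (by simp [h])
    have hPW' := (List.pairwise_cons.mp hPW).2
    have hrle : ∀ r' ∈ R, r.1 ≤ r'.1 := (List.pairwise_cons.mp hPW).1
    rw [List.foldl_cons]
    cases hlast : M.getLast? with
    | none =>
      have hMnil : M = [] := List.getLast?_eq_none_iff.mp hlast
      subst hMnil
      simp only [hlast, List.nil_append]
      have := ih [r]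
        hR' hPW'
        (by intro m hm; simp at hm; subst hm; exact hr)
        (by simp)
        (by intro m hm r' hr'; simp at hm; subst hm; exact hrle r' hr')
      refine ⟨this.1, this.2.1, fun x => ?_⟩
      rw [this.2.2 x]
      simp [pvCover]
    | some prev =>
      obtain ⟨ys, hys⟩ := List.getLast?_eq_some_iff.mp hlast
      have hprevM : prev ∈ M := by rw [hys]; simp
      have hprevb := hMb prev hprevM
      have hysb : ∀ m ∈ ys, 0 ≤ m.1 ∧ m.1 ≤ m.2 := by
        intro m hm; exact hMb m (by rw [hys]; simp [hm])
      have hysOrd : ∀ m ∈ ys, ∀ r' ∈ r :: R, m.1 ≤ r'.1 := by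
        intro m hm; exact hOrd m (by rw [hys]; simp [hm])
      have hChainYs : List.IsChain (fun p q : Int × Int => p.2 + 1 < q.1) ys ∧
          (∀ x ∈ ys.getLast?, x.2 + 1 < prev.1) := by
        rw [hys, List.isChain_append] at hMc
        exact ⟨hMc.1, fun x hx => hMc.2.2 x hx prev (by simp)⟩
      simp only [hlast]
      by_cases hgt : r.1 > prev.2 + 1
      · rw [if_pos hgt]
        have := ih (M ++ [r])
          hR' hPW'
          (by intro m hm; rcases List.mem_append.mp hm with h | h
              · exact hMb m h
              · simp at h; subst h; exact hr)
          (by rw [List.isChain_append]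
              refine ⟨hMc, by simp, ?_⟩
              intro x hx y hy
              simp at hy; subst hy
              rw [hlast] at hx; simp at hx; subst hx
              exact hgt)
          (by intro m hm r' hr'; rcases List.mem_append.mp hm with h | h
              · exact hOrd m h r' (by simp [hr'])
              · simp at h; subst h; exact hrle r' hr')
        refine ⟨this.1, this.2.1, fun x => ?_⟩
        rw [this.2.2 x]
        simp [pvCover, List.any_append, Bool.or_assoc]
      · rw [if_neg hgt]
        have hdl : M.dropLast = ys := by rw [hys, List.dropLast_concat]
        have hple : prev.1 ≤ r.1 := hOrd prev hprevM r (by simp)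
        -- the enlarged last interval covers exactly the union of the old last and r
        have hiv : ∀ x, (decide (prev.1 ≤ x) && decide (x ≤ max prev.2 r.2))
            = ((decide (prev.1 ≤ x) && decide (x ≤ prev.2)) ||
               (decide (r.1 ≤ x) && decide (x ≤ r.2))) := by
          intro x
          rw [Bool.eq_iff_iff]
          simp only [Bool.or_eq_true, Bool.and_eq_true, decide_eq_true_eq]
          omega
        have := ih (M.dropLast ++ [(prev.1, max prev.2 r.2)])
          hR' hPW'
          (by rw [hdl]; intro m hm; rcases List.mem_append.mp hm with h | h
              · exact hysb m h
              · simp at h; subst h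
                constructor
                · exact hprevb.1
                · simp only []; omega)
          (by rw [hdl, List.isChain_append]
              refine ⟨hChainYs.1, by simp, ?_⟩
              intro x hx y hy
              simp at hy; subst hy
              exact hChainYs.2 x hx)
          (by rw [hdl]; intro m hm r' hr'; rcases List.mem_append.mp hm with h | h
              · exact hysOrd m h r' (by simp [hr'])
              · simp at h; subst h
                exact hOrd prev hprevM r' (by simp [hr']))
        refine ⟨this.1, this.2.1, fun x => ?_⟩
        rw [this.2.2 x, hdl]
        have hMx : pvCover M x = (pvCover ys x ||
            (decide (prev.1 ≤ x) && decide (x ≤ prev.2))) := by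
          rw [hys]; simp [pvCover, List.any_append]
        simp only [pvCover, List.any_append, List.any_cons, List.any_nil, Bool.or_false] at hMx ⊢
        rw [hiv x, hMx]
        cases ys.any fun r => decide (r.1 ≤ x) && decide (x ≤ r.2) <;> simp [Bool.or_assoc]

theorem pvFoldl_insertBy {α : Type} (before : α → α → Bool) :
    ∀ (xs acc : List α), (∀ x ∈ xs, ∀ y ∈ acc, before x y = false) →
    xs.Pairwise (fun a b => before b a = false) →
    xs.foldl (fun a x => PySem.List.insertBy before x a) acc = acc ++ xs := by
  intro xs
  induction xs with
  | nil => simp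
  | cons x xs ih =>
    intro acc hacc hpw
    rw [List.foldl_cons,
      PySem.List.insertBy_of_forall_not_before before x acc (hacc x (by simp)),
      ih (acc ++ [x]) ?_ (List.pairwise_cons.mp hpw).2]
    · simp
    · intro z hz y hy
      rcases List.mem_append.mp hy with h | h
      · exact hacc z (by simp [hz]) y h
      · simp at h; subst h
        exact (List.pairwise_cons.mp hpw).1 z hz

theorem select_nearby_lines_spec : Claim_equal_select_nearby_lines := by
  intro lines c hdom hpre
  unfold Pre_select_nearby_lines at hpre
  unfold Spec_select_nearby_lines
  rw [select_nearby_lines, select_nearby_lines_alt]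
  dsimp only
  set mods := ((PySem.List.enumerate lines 0).filter (fun p => pvIsMod p.2)).map (fun p => p.1)
    with hmodsdef
  -- the B side is the normal form pvFgen
  show _ = pvFgen lines 0 (fun x => mods.any (fun j => decide (|x - j| ≤ c)))
  have hmem : ∀ j ∈ mods, 0 ≤ j ∧ j < (lines.length : Int) := by
    intro j hj
    rw [hmodsdef] at hj
    simp only [List.mem_map, List.mem_filter] at hj
    obtain ⟨p, ⟨hp, _⟩, rfl⟩ := hj
    rw [PySem.List.mem_enumerate_iff] at hp
    obtain ⟨k, hk, rfl⟩ := hp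
    simp only []
    omega
  by_cases hnil : mods = []
  · rw [if_pos hnil, pvFgen_false]
    intro x _ _
    rw [hnil]
    simp
  · rw [if_neg hnil, PySem.List.foldl_append_singleton_eq_map, List.nil_append]
    set f : Int → Int × Int :=
      fun idx => (max 0 (idx - c), min ((lines.length : Int) - 1) (idx + c)) with hf
    have hpw : mods.Pairwise (· < ·) := by
      rw [hmodsdef]
      exact List.pairwise_map.mpr ((PySem.List.pairwise_lt_enumerate lines 0).filter _)
    have hRpw : (mods.map f).Pairwise (fun a b => a.1 ≤ b.1 ∧ a.2 ≤ b.2) := by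
      rw [List.pairwise_map]
      exact hpw.imp (by intro a b h; rw [hf]; constructor <;> simp <;> omega)
    have hsorted : PySem.List.sorted2 (mods.map f) (fun r => r.1) (fun r => r.2) = mods.map f := by
      rw [PySem.List.sorted2]
      simp only [Bool.false_eq_true, if_false]
      rw [pvFoldl_insertBy _ _ _ (by simp) ?_, List.nil_append]
      refine hRpw.imp ?_
      intro a b h
      simp only [Bool.or_eq_false_iff, Bool.and_eq_false_iff, decide_eq_false_iff_not,
        Bool.not_eq_false', decide_eq_true_eq]
      omega
    rw [hsorted]
    have hRb : ∀ r ∈ mods.map f, 0 ≤ r.1 ∧ r.1 ≤ r.2 := by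
      intro r hr
      obtain ⟨j, hj, rfl⟩ := List.mem_map.mp hr
      have := hmem j hj
      rw [hf]
      constructor
      · simp
      · simp only []; omega
    obtain ⟨hbM, hcM, hcov⟩ := pvMerge_invariant (mods.map f) []
      hRb (hRpw.imp (fun h => h.1)) (by simp) (by simp) (by simp)
    rw [PySem.List.foldl_append_eq_flatMap, List.nil_append, pvFlatten lines _ hbM hcM]
    apply pvFgen_congr
    intro x hx hx2
    rw [hcov x]
    have hcovnil : pvCover [] x = false := by simp [pvCover]
    rw [hcovnil, Bool.false_or, pvCover, List.any_map]
    apply PySem.List.any_congr_mem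
    intro j hj
    have hjb := hmem j hj
    rw [Bool.eq_iff_iff]
    simp only [Function.comp, Bool.and_eq_true, decide_eq_true_eq, hf, abs_le]
    simp only [le_min_iff, max_le_iff]
    omega
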